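-- pv_equiv track=rewrite | github.com/shagurin/hw_3 | 3-3-2.py | short_words
-- ===== SOURCE A (Python) =====
-- def short_words(s):
--     sw=[]
--     import string
--     string.punctuation
--     for p in string.punctuation:
--         if p in s:
--             s=s.replace(p, "")
--     s=s.split()
--     for i in range(0, len(s)):
--         if len(s[i])<5:
--             sw.append(s[i])
--     sn=", ".join(sw)
--     return sn
-- ===== SOURCE B (Python) =====
-- def short_words(s):
--     import string
--     punct = set(string.punctuation)
--     cleaned = "".join(c for c in s if c not in punct)
--     return ", ".join(w for w in cleaned.split() if len(w) < 5)
-- ===== Notes on version B (the rewrite author's own statement) =====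
-- stated objective: idiomatic
-- what changed: Replaces the per-punctuation-character scan-and-replace loop (32 full replace passes over the string) by a single character pass filtering against a punctuation set, and the index loop with an accumulator by filtering comprehensions.
import Mathlib
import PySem

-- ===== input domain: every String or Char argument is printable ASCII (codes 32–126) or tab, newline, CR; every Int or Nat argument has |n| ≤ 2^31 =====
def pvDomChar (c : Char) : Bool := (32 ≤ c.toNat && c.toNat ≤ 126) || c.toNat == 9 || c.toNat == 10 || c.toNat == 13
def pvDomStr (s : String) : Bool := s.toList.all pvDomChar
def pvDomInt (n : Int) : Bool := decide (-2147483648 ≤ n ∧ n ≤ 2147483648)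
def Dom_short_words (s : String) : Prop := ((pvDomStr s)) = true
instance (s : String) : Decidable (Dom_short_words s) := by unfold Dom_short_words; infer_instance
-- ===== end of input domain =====

-- B removes all punctuation in ONE pass over the string (filter against a punctuation set)
-- instead of A's one s.replace scan per punctuation character, then keeps the short words
-- by a filter instead of an index loop with an accumulator. Same output on every input.

-- ===== PORT A =====
-- string.punctuation
def pvPunctA : String := "!\"#$%&'()*+,-./:;<=>?@[\\]^_`{|}~"

-- for p in string.punctuation: if p in s: s = s.replace(p, "")
def pvCleanA (s : String) : String :=
  pvPunctA.toList.foldl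
    (fun acc p => if PySem.Str.isIn (String.ofList [p]) acc
      then PySem.Str.replace acc (String.ofList [p]) "" else acc) s

-- sw = []; for i in range(0, len(s)): if len(s[i]) < 5: sw.append(s[i])
def pvWordLoopA (ws : List String) : List String :=
  (PySem.List.pyRange 0 (PySem.List.len ws)).foldl
    (fun sw i => if PySem.Str.len (PySem.List.pyGetD ws i "") < 5
      then sw ++ [PySem.List.pyGetD ws i ""] else sw) []

def short_words (s : String) : String :=
  PySem.Str.join ", " (pvWordLoopA (PySem.Str.split₀ (pvCleanA s)))

-- ===== PORT B =====
def pvPunctB : String := "!\"#$%&'()*+,-./:;<=>?@[\\]^_`{|}~"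

def short_words_alt (s : String) : String :=
  -- punct = set(string.punctuation); cleaned = "".join(c for c in s if c not in punct)
  -- return ", ".join(w for w in cleaned.split() if len(w) < 5)
  PySem.Str.join ", "
    ((PySem.Str.split₀ (String.ofList
        (s.toList.filter
          (fun c => !(PySem.Set.contains (PySem.Set.ofList pvPunctB.toList) c))))).filter
      (fun w => PySem.Str.len w < 5))

-- ===== PRECONDITION & SPEC =====
def Spec_short_words (s : String) (out : String) : Prop := out = short_words_alt s
instance (s : String) (out : String) : Decidable (Spec_short_words s out) := by unfold Spec_short_words; infer_instance

-- ===== CLAIM (what is proved, stated in full; the proofs are below) =====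
def Claim_equal_short_words : Prop := ∀ (s : String), Dom_short_words s → Spec_short_words s (short_words s)

-- ===== LEMMAS AND PROOFS =====

-- replace.go with a single-character pattern and empty replacement is a filter
lemma replace_go_filter (p : Char) :
    ∀ (fuel : Nat) (l acc : List Char), l.length ≤ fuel →
      PySem.Chars.replace.go [p] [] fuel l acc
        = acc.reverse ++ l.filter (fun c => !(c == p)) := by
  intro fuel
  induction fuel with
  | zero =>
    intro l acc h
    have hl : l = [] := List.eq_nil_of_length_eq_zero (Nat.le_zero.mp h)
    subst hl
    simp [PySem.Chars.replace.go]
  | succ n ih =>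
    intro l acc h
    cases l with
    | nil => simp [PySem.Chars.replace.go]
    | cons c t =>
      by_cases hc : p = c
      · subst hc
        have : List.isPrefixOf [p] (p :: t) = true := by simp [List.isPrefixOf]
        simp [PySem.Chars.replace.go, this, ih t acc (by simpa using h)]
      · have hpre : List.isPrefixOf [p] (c :: t) = false := by
          simp [List.isPrefixOf, hc]
        have hcp : (c == p) = false := by simp [Ne.symm hc]
        simp [PySem.Chars.replace.go, hpre, hcp, ih t (c :: acc) (by simpa using h)]

lemma replace_single_filter (p : Char) (l : List Char) :
    PySem.Chars.replace l [p] [] = l.filter (fun c => !(c == p)) := by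
  simpa [PySem.Chars.replace] using replace_go_filter p l.length l [] le_rfl

lemma singleton_infix_iff (p : Char) (l : List Char) : [p] <:+: l ↔ p ∈ l := by
  constructor
  · intro h; exact h.mem (List.mem_singleton_self p)
  · intro h
    obtain ⟨s, t, hst⟩ := List.append_of_mem h
    exact ⟨s, t, by simp [hst]⟩

-- A's replace loop is one filter over the characters
lemma clean_toList (ps : List Char) :
    ∀ (s : String),
      (ps.foldl (fun acc p => if PySem.Str.isIn (String.ofList [p]) acc
          then PySem.Str.replace acc (String.ofList [p]) "" else acc) s).toList
        = s.toList.filter (fun c => !(ps.contains c)) := by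
  induction ps with
  | nil => intro s; simp
  | cons p ps ih =>
    intro s
    have hstep :
        (if PySem.Str.isIn (String.ofList [p]) s
          then PySem.Str.replace s (String.ofList [p]) "" else s).toList
          = s.toList.filter (fun c => !(c == p)) := by
      by_cases h : PySem.Str.isIn (String.ofList [p]) s = true
      · rw [if_pos h, PySem.Str.toList_replace]
        simpa using replace_single_filter p s.toList
      · rw [if_neg h]
        have hmem : p ∉ s.toList := by
          intro hm
          apply h
          simp only [PySem.Str.isIn_eq]
          rw [PySem.Chars.isIn_iff_infix]
          simpa using (singleton_infix_iff p s.toList).mpr hm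
        exact (List.filter_eq_self.mpr (fun c hc => by
          simp only [Bool.not_eq_eq_eq_not, Bool.not_true, beq_eq_false_iff_ne, ne_eq]
          intro hcp; exact hmem (hcp ▸ hc))).symm
    rw [List.foldl_cons, ih, hstep, List.filter_filter]
    apply List.filter_congr
    intro c _
    by_cases hc : c = p <;> simp [hc]

-- A's index loop over the words is a filter
lemma word_loop_filter (ws : List String) :
    pvWordLoopA ws = ws.filter (fun w => PySem.Str.len w < 5) := by
  unfold pvWordLoopA
  rw [PySem.List.foldl_pyRange_pyGetD ws ""
    (fun sw w => if PySem.Str.len w < 5 then sw ++ [w] else sw) [] (by norm_num)]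
  simpa using PySem.List.foldl_append_ite_eq_filter
    (fun w => PySem.Str.len w < 5) ws []

-- the concrete punctuation set: ofList is the identity on the duplicate-free literal
lemma punct_set_eq : (PySem.Set.ofList pvPunctB.toList : List Char) = pvPunctA.toList := by
  decide

-- ===== VERDICT (by name: the statement is the Claim_ definition above) =====
theorem short_words_spec : Claim_equal_short_words := by
  intro s _
  unfold Spec_short_words short_words short_words_alt
  rw [word_loop_filter]
  have hclean :
      pvCleanA s
        = String.ofList (s.toList.filter
            (fun c => !(PySem.Set.contains (PySem.Set.ofList pvPunctB.toList) c))) := by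
    apply String.toList_inj.mp
    unfold pvCleanA
    rw [clean_toList]
    simp [PySem.Set.contains, punct_set_eq]
  rw [hclean]
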